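-- pv_equiv track=rewrite | github.com/phuong27102000/NTRU_HRSS_KEM_SV | Draft_Phuong/ternary/poly.py | r2_sqr
-- ===== SOURCE A (Python) =====
-- def r2_sqr(y,n,times):
-- #n is prime, len(y) = n, y is binary poly
--     z = y.copy()
--     for i in range(0,times):
--         temp = z.copy()
--         for j in range(0,n):
--             k = (2*j)%n
--             z[k] = temp[j]
--     return z
-- ===== SOURCE B (Python) =====
-- def r2_sqr(y, n, times):
--     # One squaring permutes coefficients; compose that map with itself by
--     # binary powering instead of repeating it `times` times.
--     if times <= 0 or n <= 0:
--         return y.copy()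
--     # g[k] = source index of position k after ONE squaring step
--     g = list(range(len(y)))
--     for j in range(n):
--         g[(2 * j) % n] = j
--     # f = g composed with itself `times` times (binary powering)
--     f = list(range(len(y)))
--     t = times
--     while t > 0:
--         if t & 1:
--             f = [g[i] for i in f]
--         g = [g[i] for i in g]
--         t >>= 1
--     return [y[i] for i in f]
-- ===== Notes on version B (the rewrite author's own statement) =====
-- stated objective: faster
-- what changed: Instead of performing `times` sequential in-place squaring passes over the coefficients, B builds the one-step source-index map once and composes it with itself by binary powering, then applies the composed map to y in a single pass.
import Mathlib
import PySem

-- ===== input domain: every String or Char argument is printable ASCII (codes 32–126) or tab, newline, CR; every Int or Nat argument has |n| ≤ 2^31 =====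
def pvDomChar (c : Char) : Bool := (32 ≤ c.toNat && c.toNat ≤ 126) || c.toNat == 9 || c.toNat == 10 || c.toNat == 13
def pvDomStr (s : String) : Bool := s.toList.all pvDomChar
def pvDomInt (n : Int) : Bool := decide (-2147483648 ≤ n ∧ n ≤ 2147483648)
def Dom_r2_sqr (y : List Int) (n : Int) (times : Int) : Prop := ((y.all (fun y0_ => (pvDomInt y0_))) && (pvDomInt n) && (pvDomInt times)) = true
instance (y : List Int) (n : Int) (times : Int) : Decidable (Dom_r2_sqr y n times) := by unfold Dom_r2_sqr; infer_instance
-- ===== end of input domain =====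

-- B replaces A's `times` sequential in-place squaring passes by building the one-step
-- source-index map once and composing it with itself by binary powering (objective: faster).

-- ===== PORT A =====
-- Indexing and assignment use the total forms pyGetD/pySetD; under Pre_ every index
-- taken is in range, where they agree with Python exactly.
def r2_sqr (y : List Int) (n : Int) (times : Int) : List Int :=
  (PySem.List.pyRange 0 times 1).foldl (fun z _ =>
    let temp := z
    (PySem.List.pyRange 0 n 1).foldl (fun z j =>
      PySem.List.pySetD z (PySem.Int.mod (2 * j) n) (PySem.List.pyGetD temp j 0)) z) y

-- ===== PORT B =====
-- list(range(len(y)))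
def pvIdent (L : Nat) : List Int := List.map (fun (k : Nat) => (k : Int)) (List.range L)

-- [g[i] for i in f]
def pvComp (g f : List Int) : List Int := f.map (fun i => PySem.List.pyGetD g i 0)

-- the `while t > 0` binary-powering loop of Source B, as recursion on the Nat value of t
def pvBpow (f g : List Int) (t : Nat) : List Int :=
  if t = 0 then f
  else pvBpow (if t % 2 = 1 then pvComp g f else f) (pvComp g g) (t / 2)
  termination_by t
  decreasing_by omega

def r2_sqr_alt (y : List Int) (n : Int) (times : Int) : List Int :=
  if times ≤ 0 ∨ n ≤ 0 then y
  else
    let g := (PySem.List.pyRange 0 n 1).foldl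
      (fun g j => PySem.List.pySetD g (PySem.Int.mod (2 * j) n) j) (pvIdent y.length)
    pvComp y (pvBpow (pvIdent y.length) g times.toNat)

-- ===== PRECONDITION & SPEC =====
-- Pre_ excludes exactly the inputs where A raises IndexError: the loops actually run
-- (times > 0 and n > 0) but n exceeds len(y), so temp[j] goes out of range.
def Pre_r2_sqr (y : List Int) (n : Int) (times : Int) : Prop :=
  n ≤ (y.length : Int) ∨ times ≤ 0 ∨ n ≤ 0
instance (y : List Int) (n : Int) (times : Int) : Decidable (Pre_r2_sqr y n times) := by
  unfold Pre_r2_sqr; infer_instance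

def pvWitness_r2_sqr : List Int × Int × Int := ([1, 0, 1, 0, 1], 5, 3)

def Spec_r2_sqr (y : List Int) (n : Int) (times : Int) (out : List Int) : Prop := out = r2_sqr_alt y n times
instance (y : List Int) (n : Int) (times : Int) (out : List Int) : Decidable (Spec_r2_sqr y n times out) := by unfold Spec_r2_sqr; infer_instance

-- ===== CLAIM (what is proved, stated in full; the proofs are below) =====
def Claim_equal_r2_sqr : Prop := ∀ (y : List Int) (n : Int) (times : Int), Dom_r2_sqr y n times → Pre_r2_sqr y n times → Spec_r2_sqr y n times (r2_sqr y n times)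

-- ===== LEMMAS AND PROOFS =====

-- entries of a are valid indices into a length-L list, and a itself has length L
def pvValid (L : Nat) (a : List Int) : Prop :=
  a.length = L ∧ ∀ e ∈ a, 0 ≤ e ∧ e < (L : Int)

-- the t-th power of the index map g under composition pvComp
def pvPwr (L : Nat) (g : List Int) : Nat → List Int
  | 0 => pvIdent L
  | t + 1 => pvComp (pvPwr L g t) g

lemma pvIdent_get (L : Nat) (i : Int) (h0 : 0 ≤ i) (h1 : i < (L : Int)) :
    PySem.List.pyGetD (pvIdent L) i 0 = i := by
  have hn : i.toNat < L := by omega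
  rw [PySem.List.pyGetD_of_nonneg _ _ h0]
  unfold pvIdent
  rw [PySem.List.getD_map_range _ _ _ _ hn]
  omega

lemma pvValid_ident (L : Nat) : pvValid L (pvIdent L) := by
  refine ⟨by simp [pvIdent], ?_⟩
  intro e he
  rw [pvIdent, List.mem_map] at he
  obtain ⟨k, hk, rfl⟩ := he
  rw [List.mem_range] at hk
  omega

lemma length_pvComp (g f : List Int) : (pvComp g f).length = f.length := by
  simp [pvComp]

lemma pvValid_comp {L : Nat} {g f : List Int} (hg : pvValid L g) (hf : pvValid L f) :
    pvValid L (pvComp g f) := by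
  refine ⟨by simp [pvComp, hf.1], ?_⟩
  intro e he
  simp only [pvComp, List.mem_map] at he
  obtain ⟨i, hi, rfl⟩ := he
  obtain ⟨h0, h1⟩ := hf.2 i hi
  rw [PySem.List.pyGetD_eq_getElem g 0 h0 (by rw [hg.1]; exact_mod_cast h1)]
  exact hg.2 _ (List.getElem_mem _)

-- z indexed by the identity list is z itself
lemma pvComp_ident_right {L : Nat} {z : List Int} (hz : z.length = L) :
    pvComp z (pvIdent L) = z := by
  subst hz
  unfold pvComp pvIdent
  rw [← PySem.List.pyRange_zero_nat]
  exact PySem.List.map_pyGetD_pyRange_zero' z 0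

lemma pvComp_ident_left {L : Nat} {f : List Int} (hf : pvValid L f) :
    pvComp (pvIdent L) f = f := by
  unfold pvComp
  calc f.map (fun i => PySem.List.pyGetD (pvIdent L) i 0)
      = f.map id := List.map_congr_left
        (fun i hi => pvIdent_get L i (hf.2 i hi).1 (hf.2 i hi).2)
    _ = f := List.map_id f

lemma pvComp_assoc {L : Nat} (a : List Int) {P G : List Int}
    (hP : P.length = L) (hG : ∀ e ∈ G, 0 ≤ e ∧ e < (L : Int)) :
    pvComp (pvComp a P) G = pvComp a (pvComp P G) := by
  unfold pvComp
  rw [List.map_map]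
  apply List.map_congr_left
  intro i hi
  obtain ⟨h0, h1⟩ := hG i hi
  have hlen : i < ((P.map (fun i => PySem.List.pyGetD a i 0)).length : Int) := by
    simp [hP]; exact_mod_cast h1
  rw [PySem.List.pyGetD_eq_getElem _ 0 h0 hlen]
  have hP' : i < (P.length : Int) := by rw [hP]; exact_mod_cast h1
  simp only [Function.comp_apply, List.getElem_map]
  rw [PySem.List.pyGetD_eq_getElem P 0 h0 hP']

-- one write of A's inner loop commutes with indexing through temp
lemma pvSet_comp (temp a : List Int) (k j : Int) (hk : 0 ≤ k) :
    PySem.List.pySetD (pvComp temp a) k (PySem.List.pyGetD temp j 0)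
      = pvComp temp (PySem.List.pySetD a k j) := by
  unfold pvComp
  rw [PySem.List.pySetD_of_nonneg _ _ hk, PySem.List.pySetD_of_nonneg _ _ hk,
    List.map_set]

-- A's inner loop over writes = temp indexed through the index-map fold
lemma pvInner_fold (n : Int) (hn : 0 < n) (temp : List Int) :
    ∀ (ws : List Int) (a : List Int),
      ws.foldl (fun z j => PySem.List.pySetD z (PySem.Int.mod (2 * j) n) (PySem.List.pyGetD temp j 0)) (pvComp temp a)
        = pvComp temp (ws.foldl (fun g j => PySem.List.pySetD g (PySem.Int.mod (2 * j) n) j) a) := by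
  intro ws
  induction ws with
  | nil => intro a; rfl
  | cons j ws ih =>
    intro a
    simp only [List.foldl_cons]
    rw [pvSet_comp temp a _ j (PySem.Int.mod_nonneg _ hn)]
    exact ih _

lemma pvFoldl_const {α β : Type} (F : α → α) :
    ∀ (ws : List β) (z : α), ws.foldl (fun z _ => F z) z = F^[ws.length] z := by
  intro ws
  induction ws with
  | nil => intro z; rfl
  | cons w ws ih =>
    intro z
    simp only [List.foldl_cons, List.length_cons, Function.iterate_succ_apply]
    exact ih (F z)

lemma pvValid_gfold {L : Nat} {n : Int} (hn : 0 < n) (hnL : n ≤ (L : Int)) :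
    pvValid L ((PySem.List.pyRange 0 n 1).foldl
      (fun g j => PySem.List.pySetD g (PySem.Int.mod (2 * j) n) j) (pvIdent L)) := by
  have aux : ∀ (ws : List Int) (a : List Int), (∀ j ∈ ws, 0 ≤ j ∧ j < n) → pvValid L a →
      pvValid L (ws.foldl (fun g j => PySem.List.pySetD g (PySem.Int.mod (2 * j) n) j) a) := by
    intro ws
    induction ws with
    | nil => intro a _ ha; exact ha
    | cons j ws ih =>
      intro a hws ha
      simp only [List.foldl_cons]
      refine ih _ (fun x hx => hws x (List.mem_cons_of_mem _ hx)) ?_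
      obtain ⟨hj0, hj1⟩ := hws j (List.mem_cons_self)
      refine ⟨by rw [PySem.List.length_pySetD]; exact ha.1, ?_⟩
      intro e he
      rw [PySem.List.pySetD_of_nonneg _ _ (PySem.Int.mod_nonneg _ hn)] at he
      rcases List.mem_or_eq_of_mem_set he with h | rfl
      · exact ha.2 e h
      · exact ⟨hj0, by omega⟩
  exact aux _ _ (fun j hj => PySem.List.mem_pyRange_one.mp hj) (pvValid_ident L)

lemma pvFoldl_id {α β : Type} : ∀ (ws : List β) (z : α), ws.foldl (fun z _ => z) z = z := by
  intro ws
  induction ws with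
  | nil => intro z; rfl
  | cons w ws ih => intro z; exact ih z

lemma pvValid_pwr {L : Nat} {g : List Int} (hg : pvValid L g) (t : Nat) :
    pvValid L (pvPwr L g t) := by
  induction t with
  | zero => exact pvValid_ident L
  | succ t ih => exact pvValid_comp ih hg

lemma pvPwr_sq {L : Nat} {g : List Int} (hg : pvValid L g) :
    ∀ m, pvPwr L (pvComp g g) m = pvPwr L g (2 * m) := by
  intro m
  induction m with
  | zero => rfl
  | succ m ih =>
    show pvComp (pvPwr L (pvComp g g) m) (pvComp g g) = pvPwr L g (2 * (m + 1))
    rw [ih, ← pvComp_assoc _ hg.1 (fun e he => hg.2 e he)]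
    rw [show 2 * (m + 1) = (2 * m + 1) + 1 by ring]
    rfl

lemma pvBpow_eq {L : Nat} :
    ∀ (t : Nat) (g f : List Int), pvValid L g → pvValid L f →
      pvBpow f g t = pvComp (pvPwr L g t) f := by
  intro t
  induction t using Nat.strong_induction_on with
  | _ t ih =>
    intro g f hg hf
    rw [pvBpow]
    by_cases h0 : t = 0
    · subst h0
      simp only [reduceIte]
      exact (pvComp_ident_left hf).symm
    · rw [if_neg h0]
      have hg2 : pvValid L (pvComp g g) := pvValid_comp hg hg
      by_cases hodd : t % 2 = 1
      · rw [if_pos hodd]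
        rw [ih (t / 2) (by omega) _ _ hg2 (pvValid_comp hg hf)]
        rw [pvPwr_sq hg, ← pvComp_assoc _ hg.1 (fun e he => hf.2 e he)]
        have hts : pvPwr L g ((2 * (t / 2)) + 1) = pvPwr L g t := by
          congr 1
          omega
        rw [← hts]
        rfl
      · rw [if_neg hodd]
        rw [ih (t / 2) (by omega) _ _ hg2 hf, pvPwr_sq hg]
        congr 2
        omega

-- ===== VERDICT (by name: the statement is the Claim_ definition above) =====
theorem r2_sqr_spec : Claim_equal_r2_sqr := by
  intro y n times _ hpre
  unfold Spec_r2_sqr r2_sqr r2_sqr_alt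
  by_cases hc : times ≤ 0 ∨ n ≤ 0
  · rw [if_pos hc]
    rcases hc with ht | hn0
    · rw [PySem.List.pyRange_one_eq_nil ht]
      rfl
    · rw [PySem.List.pyRange_one_eq_nil hn0]
      exact pvFoldl_id _ y
  · rw [if_neg hc]
    push Not at hc
    obtain ⟨ht, hn⟩ := hc
    have hnL : n ≤ (y.length : Int) := by
      rcases hpre with h | h | h
      · exact h
      · omega
      · omega
    set G := (PySem.List.pyRange 0 n 1).foldl
      (fun g j => PySem.List.pySetD g (PySem.Int.mod (2 * j) n) j) (pvIdent y.length) with hGdef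
    have hGv : pvValid y.length G := pvValid_gfold hn hnL
    have hF : ∀ z : List Int, z.length = y.length →
        (PySem.List.pyRange 0 n 1).foldl
          (fun w j => PySem.List.pySetD w (PySem.Int.mod (2 * j) n) (PySem.List.pyGetD z j 0)) z
          = pvComp z G := by
      intro z hz
      calc (PySem.List.pyRange 0 n 1).foldl
            (fun w j => PySem.List.pySetD w (PySem.Int.mod (2 * j) n) (PySem.List.pyGetD z j 0)) z
          = (PySem.List.pyRange 0 n 1).foldl
            (fun w j => PySem.List.pySetD w (PySem.Int.mod (2 * j) n) (PySem.List.pyGetD z j 0))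
            (pvComp z (pvIdent y.length)) := by rw [pvComp_ident_right hz]
        _ = pvComp z G := pvInner_fold n hn z _ _
    have hiter : ∀ t : Nat,
        (fun z : List Int => (PySem.List.pyRange 0 n 1).foldl
          (fun w j => PySem.List.pySetD w (PySem.Int.mod (2 * j) n) (PySem.List.pyGetD z j 0)) z)^[t] y
          = pvComp y (pvPwr y.length G t) := by
      intro t
      induction t with
      | zero => exact (pvComp_ident_right rfl).symm
      | succ t ih =>
        rw [Function.iterate_succ_apply', ih]
        have hlen : (pvComp y (pvPwr y.length G t)).length = y.length := by
          rw [length_pvComp, (pvValid_pwr hGv t).1]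
        rw [hF _ hlen, pvComp_assoc y (pvValid_pwr hGv t).1 (fun e he => hGv.2 e he)]
        rfl
    rw [pvFoldl_const (fun z : List Int => (PySem.List.pyRange 0 n 1).foldl
      (fun w j => PySem.List.pySetD w (PySem.Int.mod (2 * j) n) (PySem.List.pyGetD z j 0)) z)]
    rw [PySem.List.length_pyRange_one]
    rw [show ((times : Int) - 0).toNat = times.toNat by omega]
    rw [hiter times.toNat]
    show pvComp y (pvPwr y.length G times.toNat) = pvComp y (pvBpow (pvIdent y.length) G times.toNat)
    rw [pvBpow_eq times.toNat G (pvIdent y.length) hGv (pvValid_ident _)]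
    rw [pvComp_ident_right (pvValid_pwr hGv times.toNat).1]
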